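-- pv_equiv track=rewrite | github.com/alyxbb/powerpoint_karaoke-discord | main.py | countbyuser
-- ===== SOURCE A (Python) =====
-- def countbyuser(links):
--     users = {}
--     for link in links:
--         if link[2] in users:
--             users[link[2]] += 1
--         else:
--             users[link[2]] = 1
--     return users
-- ===== SOURCE B (Python) =====
-- def countbyuser(links):
--     keys = list(dict.fromkeys(link[2] for link in links))
--     return {k: sum(1 for link in links if link[2] == k) for k in keys}
-- ===== Notes on version B (the rewrite author's own statement) =====
-- stated objective: alternative
-- what changed: Replaces the single accumulating dict pass with two phases: first collect the distinct user keys in first-occurrence order, then build the result by rescanning the links once per key to count matches.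
import Mathlib
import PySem

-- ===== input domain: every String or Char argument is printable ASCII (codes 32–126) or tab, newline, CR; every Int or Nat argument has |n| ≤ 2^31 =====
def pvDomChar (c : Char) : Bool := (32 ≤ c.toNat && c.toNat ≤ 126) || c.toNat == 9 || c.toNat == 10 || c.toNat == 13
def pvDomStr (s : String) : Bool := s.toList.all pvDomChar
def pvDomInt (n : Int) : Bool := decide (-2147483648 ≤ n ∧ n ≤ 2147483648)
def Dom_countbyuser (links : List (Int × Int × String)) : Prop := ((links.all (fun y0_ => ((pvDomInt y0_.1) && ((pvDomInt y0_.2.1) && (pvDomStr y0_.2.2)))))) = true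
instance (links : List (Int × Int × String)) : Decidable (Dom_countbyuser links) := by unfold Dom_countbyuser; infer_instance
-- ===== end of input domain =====

-- B replaces A's single accumulating dict pass by a distinct-keys pass followed by a counting rescan per key (alternative decomposition, same results).

-- ===== PORT A =====
def countbyuser (links : List (Int × Int × String)) : List (String × Int) :=
  (links.foldl
    (fun users link =>
      if users.contains link.2.2 then
        users.insert link.2.2 (users.getD link.2.2 0 + 1)   -- users[link[2]] += 1
      else
        users.insert link.2.2 1)                             -- users[link[2]] = 1
    PySem.Dict.empty).items

-- ===== PORT B =====
def countbyuser_alt (links : List (Int × Int × String)) : List (String × Int) :=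
  let keys := PySem.Set.ofList (links.map (fun link => link.2.2))   -- list(dict.fromkeys(...)): distinct, first-occurrence order
  keys.map (fun k =>
    (k, links.foldl (fun s link => if link.2.2 == k then s + 1 else s) (0 : Int)))  -- sum(1 for link in links if link[2] == k)

-- ===== PRECONDITION & SPEC =====
def Spec_countbyuser (links : List (Int × Int × String)) (out : List (String × Int)) : Prop := out = countbyuser_alt links
instance (links : List (Int × Int × String)) (out : List (String × Int)) : Decidable (Spec_countbyuser links out) := by unfold Spec_countbyuser; infer_instance

-- ===== CLAIM (what is proved, stated in full; the proofs are below) =====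
def Claim_equal_countbyuser : Prop := ∀ (links : List (Int × Int × String)), Dom_countbyuser links → Spec_countbyuser links (countbyuser links)

-- ===== LEMMAS AND PROOFS =====

-- A's guarded step is exactly the insert-getD-add-one counting step.
lemma stepA_eq (d : PySem.Dict String Int) (k : String) :
    (if d.contains k then d.insert k (d.getD k 0 + 1) else d.insert k 1)
      = d.insert k (d.getD k 0 + 1) := by
  by_cases h : d.contains k = true
  · simp [h]
  · have h' : d.contains k = false := by simpa using h
    rw [PySem.Dict.getD_of_not_contains (h := h')]
    simp [h']

-- B's inner rescan computes the count of k among the key projections.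
lemma inner_count (links : List (Int × Int × String)) (k : String) (s : Int) :
    links.foldl (fun s link => if link.2.2 == k then s + 1 else s) s
      = s + ((links.map (fun link => link.2.2)).count k : Int) := by
  induction links generalizing s with
  | nil => simp
  | cons l t ih =>
    simp only [List.foldl_cons, List.map_cons, List.count_cons, ih]
    by_cases h : l.2.2 == k
    · simp [h]; ring
    · simp [h]

lemma countbyuser_eq_alt (links : List (Int × Int × String)) :
    countbyuser links = countbyuser_alt links := by
  unfold countbyuser countbyuser_alt
  have hstep : (fun (users : PySem.Dict String Int) (link : Int × Int × String) =>
      if users.contains link.2.2 then users.insert link.2.2 (users.getD link.2.2 0 + 1)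
      else users.insert link.2.2 1)
      = (fun users link => users.insert link.2.2 (users.getD link.2.2 0 + 1)) := by
    funext d l; exact stepA_eq d l.2.2
  rw [hstep]
  have hmap : links.foldl (fun (d : PySem.Dict String Int) l => d.insert l.2.2 (d.getD l.2.2 0 + 1)) PySem.Dict.empty
      = (links.map (fun l => l.2.2)).foldl (fun d x => d.insert x (d.getD x 0 + 1)) PySem.Dict.empty := by
    rw [List.foldl_map]
  rw [hmap, PySem.Dict.foldl_insert_getD_add_one_eq_counter, PySem.Dict.items_counter]
  apply List.map_congr_left
  intro k _
  rw [inner_count]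
  simp

-- ===== VERDICT (by name: the statement is the Claim_ definition above) =====
theorem countbyuser_spec : Claim_equal_countbyuser := by
  intro links _
  unfold Spec_countbyuser
  exact countbyuser_eq_alt links
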